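-- pv_equiv track=rewrite | github.com/Preventera/SafetyAgentic | backups/UX_REVOLUTION_20250726_150132/src/agents/collecte/a2_observations.py | identify_behavior_improvements
-- ===== SOURCE A (Python) =====
-- from typing import Dict, List, Any, Optional
--
-- def identify_behavior_improvements(behaviors: List[Dict]) -> List[str]:
--     """Identifie les axes d'amélioration comportementale"""
--
--     improvements = []
--
--     behavior_texts = [b["behavior"].lower() for b in behaviors]
--
--     if any("manutention" in text for text in behavior_texts):
--         improvements.append("Formation gestes et postures")
--
--     if any("posture" in text for text in behavior_texts):
--         improvements.append("Analyse ergonomique postes")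
--
--     if any("conflit" in text for text in behavior_texts):
--         improvements.append("Formation gestion stress et conflits")
--
--     if any("technique" in text for text in behavior_texts):
--         improvements.append("Renforcement formation technique")
--
--     return improvements
-- ===== SOURCE B (Python) =====
-- def identify_behavior_improvements(behaviors):
--     """Identifie les axes d'amelioration comportementale (single pass, four flags)"""
--     manut = post = confl = tech = False
--     for b in behaviors:
--         text = b["behavior"].lower()
--         manut = manut or "manutention" in text
--         post = post or "posture" in text
--         confl = confl or "conflit" in text
--         tech = tech or "technique" in text
--     return (
--         (["Formation gestes et postures"] if manut else [])
--         + (["Analyse ergonomique postes"] if post else [])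
--         + (["Formation gestion stress et conflits"] if confl else [])
--         + (["Renforcement formation technique"] if tech else [])
--     )
-- ===== Notes on version B (the rewrite author's own statement) =====
-- stated objective: alternative
-- what changed: A builds an intermediate list of every lowered text and then makes four separate any()-scans over it; B makes a single pass over the behaviors maintaining four boolean flags (no intermediate list, no repeated scans) and assembles the result from the flags.
import Mathlib
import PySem

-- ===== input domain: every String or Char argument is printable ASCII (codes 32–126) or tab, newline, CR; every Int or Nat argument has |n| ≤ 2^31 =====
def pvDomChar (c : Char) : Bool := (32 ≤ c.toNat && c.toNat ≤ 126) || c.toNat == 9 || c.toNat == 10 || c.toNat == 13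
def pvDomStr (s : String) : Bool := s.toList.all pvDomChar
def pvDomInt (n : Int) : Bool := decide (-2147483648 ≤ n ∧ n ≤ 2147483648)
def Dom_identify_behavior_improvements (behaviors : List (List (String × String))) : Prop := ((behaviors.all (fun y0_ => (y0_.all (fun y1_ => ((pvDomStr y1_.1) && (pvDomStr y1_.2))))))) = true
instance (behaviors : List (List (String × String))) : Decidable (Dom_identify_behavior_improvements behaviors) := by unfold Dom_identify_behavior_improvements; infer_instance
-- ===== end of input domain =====

-- B replaces A's intermediate list of lowered texts and four separate any() scans by one
-- pass over the behaviors that maintains four boolean flags (objective: alternative).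

-- ===== PORT A =====
def identify_behavior_improvements (behaviors : List (List (String × String))) : List String :=
  let behavior_texts := behaviors.map
    (fun b => PySem.Str.lower (((PySem.Dict.mk b).get? "behavior").getD ""))
  let improvements : List String := []
  let improvements := if behavior_texts.any (fun t => PySem.Str.isIn "manutention" t)
    then improvements ++ ["Formation gestes et postures"] else improvements
  let improvements := if behavior_texts.any (fun t => PySem.Str.isIn "posture" t)
    then improvements ++ ["Analyse ergonomique postes"] else improvements
  let improvements := if behavior_texts.any (fun t => PySem.Str.isIn "conflit" t)
    then improvements ++ ["Formation gestion stress et conflits"] else improvements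
  let improvements := if behavior_texts.any (fun t => PySem.Str.isIn "technique" t)
    then improvements ++ ["Renforcement formation technique"] else improvements
  improvements

-- ===== PORT B =====
def identify_behavior_improvements_alt (behaviors : List (List (String × String))) : List String :=
  let flags := behaviors.foldl
    (fun (f : Bool × Bool × Bool × Bool) b =>
      let text := PySem.Str.lower (((PySem.Dict.mk b).get? "behavior").getD "")
      (f.1 || PySem.Str.isIn "manutention" text,
       f.2.1 || PySem.Str.isIn "posture" text,
       f.2.2.1 || PySem.Str.isIn "conflit" text,
       f.2.2.2 || PySem.Str.isIn "technique" text))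
    (false, false, false, false)
  (if flags.1 then ["Formation gestes et postures"] else []) ++
  (if flags.2.1 then ["Analyse ergonomique postes"] else []) ++
  (if flags.2.2.1 then ["Formation gestion stress et conflits"] else []) ++
  (if flags.2.2.2 then ["Renforcement formation technique"] else [])

-- ===== PRECONDITION & SPEC =====
-- Pre_: every behavior dict has the key "behavior"; otherwise the Python raises KeyError.
def Pre_identify_behavior_improvements (behaviors : List (List (String × String))) : Prop :=
  (behaviors.all (fun b => (PySem.Dict.mk b).contains "behavior")) = true
instance (behaviors : List (List (String × String))) : Decidable (Pre_identify_behavior_improvements behaviors) := by unfold Pre_identify_behavior_improvements; infer_instance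
def pvWitness_identify_behavior_improvements : (List (List (String × String))) :=
  [[("behavior", "Posture incorrecte")], [("behavior", "travail technique")]]

def Spec_identify_behavior_improvements (behaviors : List (List (String × String))) (out : List String) : Prop := out = identify_behavior_improvements_alt behaviors
instance (behaviors : List (List (String × String))) (out : List String) : Decidable (Spec_identify_behavior_improvements behaviors out) := by unfold Spec_identify_behavior_improvements; infer_instance

-- ===== CLAIM (what is proved, stated in full; the proofs are below) =====
def Claim_equal_identify_behavior_improvements : Prop := ∀ (behaviors : List (List (String × String))), Dom_identify_behavior_improvements behaviors → Pre_identify_behavior_improvements behaviors → Spec_identify_behavior_improvements behaviors (identify_behavior_improvements behaviors)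

-- ===== LEMMAS AND PROOFS =====

-- The four-flag fold computes the four any-scans.
theorem pv_fold_flags (p1 p2 p3 p4 : α → Bool) (l : List α) (a b c d : Bool) :
    l.foldl (fun (f : Bool × Bool × Bool × Bool) x =>
        (f.1 || p1 x, f.2.1 || p2 x, f.2.2.1 || p3 x, f.2.2.2 || p4 x)) (a, b, c, d)
      = (a || l.any p1, b || l.any p2, c || l.any p3, d || l.any p4) := by
  induction l generalizing a b c d with
  | nil => simp
  | cons x xs ih => rw [List.foldl_cons, ih]; simp [List.any_cons, Bool.or_assoc]

theorem identify_behavior_improvements_spec : Claim_equal_identify_behavior_improvements := by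
  intro behaviors _ _
  unfold Spec_identify_behavior_improvements identify_behavior_improvements identify_behavior_improvements_alt
  rw [pv_fold_flags]
  simp only [List.any_map, Function.comp_def, Bool.false_or]
  split_ifs <;> rfl
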